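-- pv_equiv track=rewrite | github.com/ElnurBDa/my-python-projects | Euler_s_project_problems/1-100/31-40/задача_32.py | cutter
-- ===== SOURCE A (Python) =====
-- def cutter(n):
--     digits=['1','2','3','4','5','6','7','8','9']
--     n_str=str(n)
--     if  n_str.count('0')>0:
--         return False
--     for x in digits:
--         if n_str.count(x)>1 :
--             return False
--     return True
-- ===== SOURCE B (Python) =====
-- def cutter(n):
--     s = str(n)
--     return '0' not in s and len(set(s)) == len(s)
-- ===== Notes on version B (the rewrite author's own statement) =====
-- stated objective: simpler
-- what changed: Replaces the '0'-count test plus nine per-digit .count scans with a single membership test and one set built in one pass, detecting duplicates by comparing len(set(s)) with len(s).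
import Mathlib
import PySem

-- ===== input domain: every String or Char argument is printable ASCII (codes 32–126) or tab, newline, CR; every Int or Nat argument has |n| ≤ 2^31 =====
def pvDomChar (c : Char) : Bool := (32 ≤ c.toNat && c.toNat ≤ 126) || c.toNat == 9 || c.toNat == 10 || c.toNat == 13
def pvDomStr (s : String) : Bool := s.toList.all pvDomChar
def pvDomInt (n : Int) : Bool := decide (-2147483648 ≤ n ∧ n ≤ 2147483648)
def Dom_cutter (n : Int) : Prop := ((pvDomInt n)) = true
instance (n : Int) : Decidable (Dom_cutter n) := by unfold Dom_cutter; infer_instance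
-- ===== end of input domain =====

-- B replaces A's '0'-count test plus nine per-digit count scans by one membership test
-- and a single set built in one pass, comparing len(set(s)) with len(s) (objective: simpler).

-- ===== PORT A =====
-- the 'for x in digits: if n_str.count(x) > 1: return False' loop
def cutterLoop (nStr : String) : List String → Bool
  | [] => true
  | x :: xs => if PySem.Str.count nStr x > 1 then false else cutterLoop nStr xs

def cutter (n : Int) : Bool :=
  let digits : List String := ["1", "2", "3", "4", "5", "6", "7", "8", "9"]
  let nStr := PySem.Int.toStr n
  if PySem.Str.count nStr "0" > 0 then false
  else cutterLoop nStr digits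

-- ===== PORT B =====
def cutter_alt (n : Int) : Bool :=
  let s := PySem.Int.toStr n
  !PySem.Str.isIn "0" s && (PySem.Set.len (PySem.Set.ofList s.toList) == PySem.Str.len s)

-- ===== PRECONDITION & SPEC =====
def Spec_cutter (n : Int) (out : Bool) : Prop := out = cutter_alt n
instance (n : Int) (out : Bool) : Decidable (Spec_cutter n out) := by unfold Spec_cutter; infer_instance

-- ===== CLAIM (what is proved, stated in full; the proofs are below) =====
def Claim_equal_cutter : Prop := ∀ (n : Int), Dom_cutter n → Spec_cutter n (cutter n)

-- ===== LEMMAS AND PROOFS =====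

theorem char_eq_of_toNat (c d : Char) (h : c.toNat = d.toNat) : c = d := by
  apply Char.ext; apply UInt32.toNat_inj.mp; exact h

-- any digit character other than '0' is one of A's nine literals
theorem digit_mem (c : Char) (h : c.isDigit = true) (h0 : c ≠ '0') :
    c ∈ ['1', '2', '3', '4', '5', '6', '7', '8', '9'] := by
  have hb : 48 ≤ c.toNat ∧ c.toNat ≤ 57 := by
    simp only [Char.isDigit, Bool.and_eq_true, decide_eq_true_eq] at h
    exact ⟨h.1, h.2⟩
  have h48 : c.toNat ≠ 48 := fun hh => h0 (char_eq_of_toNat c '0' (by rw [hh]; rfl))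
  obtain ⟨h1, h2⟩ := hb
  have : c.toNat = 49 ∨ c.toNat = 50 ∨ c.toNat = 51 ∨ c.toNat = 52 ∨ c.toNat = 53 ∨
      c.toNat = 54 ∨ c.toNat = 55 ∨ c.toNat = 56 ∨ c.toNat = 57 := by omega
  rcases this with h | h | h | h | h | h | h | h | h
  · rw [char_eq_of_toNat c '1' (by rw [h]; rfl)]; decide
  · rw [char_eq_of_toNat c '2' (by rw [h]; rfl)]; decide
  · rw [char_eq_of_toNat c '3' (by rw [h]; rfl)]; decide
  · rw [char_eq_of_toNat c '4' (by rw [h]; rfl)]; decide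
  · rw [char_eq_of_toNat c '5' (by rw [h]; rfl)]; decide
  · rw [char_eq_of_toNat c '6' (by rw [h]; rfl)]; decide
  · rw [char_eq_of_toNat c '7' (by rw [h]; rfl)]; decide
  · rw [char_eq_of_toNat c '8' (by rw [h]; rfl)]; decide
  · rw [char_eq_of_toNat c '9' (by rw [h]; rfl)]; decide

-- Python s.count(c) for a one-character needle is the character count
theorem count_go_singleton (c : Char) : ∀ (l : List Char) (fuel acc : Nat), l.length ≤ fuel →
    PySem.Chars.count.go [c] fuel l acc = acc + l.count c := by
  intro l
  induction l with
  | nil => intro fuel acc h; cases fuel <;> simp [PySem.Chars.count.go]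
  | cons x t ih =>
    intro fuel acc h
    cases fuel with
    | zero => simp at h
    | succ f =>
      simp only [PySem.Chars.count.go]
      simp only [List.length_cons] at h
      by_cases hc : c = x
      · subst hc
        simp only [List.isPrefixOf, beq_self_eq_true, Bool.true_and, if_true,
          List.length_singleton, List.drop_one, List.tail_cons, List.count_cons_self]
        rw [ih _ _ (by omega)]
        omega
      · simp [List.isPrefixOf, Ne.symm hc, hc]
        rw [ih _ _ (by omega)]

theorem count_singleton (s : List Char) (c : Char) : PySem.Chars.count s [c] = s.count c := by
  simp [PySem.Chars.count, count_go_singleton c s s.length 0 le_rfl]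

-- len(set(l)) == len(l) exactly when l has no duplicates
theorem length_ofList_eq_iff (l : List Char) :
    (PySem.Set.ofList l).length = l.length ↔ l.Nodup := by
  constructor
  · induction l with
    | nil => intro _; exact List.nodup_nil
    | cons x xs ih =>
      intro h
      rw [PySem.Set.ofList_cons] at h
      simp only [List.length_cons] at h
      by_cases hx : x ∈ xs
      · exfalso
        have hmem : x ∈ PySem.Set.ofList xs := (PySem.Set.mem_ofList xs x).mpr hx
        have hlt : ((PySem.Set.ofList xs).discard x).length < (PySem.Set.ofList xs).length := by
          unfold PySem.Set.discard
          exact List.length_filter_lt_length_iff_exists.mpr ⟨x, hmem, by simp⟩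
        have hle := PySem.Set.length_ofList_le xs
        omega
      · have heq : (PySem.Set.ofList xs).discard x = PySem.Set.ofList xs := by
          unfold PySem.Set.discard
          apply List.filter_eq_self.mpr
          intro a ha
          have : a ∈ xs := (PySem.Set.mem_ofList xs a).mp ha
          simp only [Bool.not_eq_eq_eq_not, Bool.not_true, beq_eq_false_iff_ne, ne_eq]
          intro hax; exact hx (hax ▸ this)
        rw [heq] at h
        exact List.nodup_cons.mpr ⟨hx, ih (by omega)⟩
  · intro h
    rw [PySem.Set.ofList_eq_self_of_nodup l h]

-- every character of str(n) is a digit or '-', and '-' occurs at most once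
theorem toChars_shape (n : Int) :
    (∀ c ∈ PySem.Int.toChars n, c.isDigit = true ∨ c = '-') ∧
      (PySem.Int.toChars n).count '-' ≤ 1 := by
  have hdig : ∀ (m : Nat) (c : Char), c ∈ Nat.toDigits 10 m → c.isDigit = true :=
    fun m c hc => Nat.isDigit_of_mem_toDigits (by norm_num) (by norm_num) hc
  have hdash : ∀ (m : Nat), (Nat.toDigits 10 m).count '-' = 0 := by
    intro m
    apply List.count_eq_zero.mpr
    intro hmem
    have := hdig m '-' hmem
    simp [Char.isDigit] at this
  unfold PySem.Int.toChars
  split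
  · refine ⟨?_, ?_⟩
    · intro c hc
      rcases List.mem_cons.mp hc with h | h
      · exact Or.inr h
      · exact Or.inl (hdig _ _ h)
    · rw [List.count_cons_self, hdash]
  · exact ⟨fun c hc => Or.inl (hdig _ _ hc), by simp [hdash]⟩

-- the loop over ['1'..'9'] succeeds iff each of those digits occurs at most once
theorem cutterLoop_eq (s : String) : ∀ ds : List String,
    cutterLoop s ds = ds.all (fun d => !decide (PySem.Str.count s d > 1)) := by
  intro ds
  induction ds with
  | nil => rfl
  | cons x xs ih =>
    simp only [cutterLoop, List.all_cons, ih]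
    by_cases h : PySem.Str.count s x > 1 <;> simp

-- core equivalence on the character list of str(n)
theorem key_equiv (l : List Char)
    (hshape : ∀ c ∈ l, c.isDigit = true ∨ c = '-') (hdash : l.count '-' ≤ 1)
    (h0 : l.count '0' = 0) :
    ((['1', '2', '3', '4', '5', '6', '7', '8', '9'] : List Char).all
        (fun d => !decide (l.count d > 1))) = decide l.Nodup := by
  by_cases hnd : l.Nodup
  · simp only [hnd, decide_true]
    apply List.all_eq_true.mpr
    intro d _
    have := List.nodup_iff_count_le_one.mp hnd d
    simp; omega
  · simp only [hnd, decide_false]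
    apply (Bool.eq_false_iff).mpr
    intro hall
    apply hnd
    apply List.nodup_iff_count_le_one.mpr
    intro a
    by_cases ha : a ∈ l
    · rcases hshape a ha with hd | hd
      · by_cases ha0 : a = '0'
        · subst ha0; omega
        · have hmem := digit_mem a hd ha0
          have := List.all_eq_true.mp hall a hmem
          simp at this; omega
      · subst hd; exact hdash
    · rw [List.count_eq_zero.mpr ha]; omega
  
-- ===== VERDICT (by name: the statement is the Claim_ definition above) =====
theorem cutter_spec : Claim_equal_cutter := by
  intro n _
  unfold Spec_cutter cutter cutter_alt
  simp only []
  have htl : (PySem.Int.toStr n).toList = PySem.Int.toChars n := PySem.Int.toList_toStr n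
  set l := PySem.Int.toChars n with hl
  obtain ⟨hshape, hdash⟩ := toChars_shape n
  have hc0 : PySem.Str.count (PySem.Int.toStr n) "0" = l.count '0' := by
    rw [PySem.Str.count_eq, htl]
    exact count_singleton l '0'
  have hisin : PySem.Str.isIn "0" (PySem.Int.toStr n) = l.contains '0' := by
    rw [Bool.eq_iff_iff, PySem.Str.isIn_iff_infix, htl]
    show ['0'] <:+: l ↔ _
    rw [List.singleton_infix_iff]
    simp
  by_cases h0 : l.count '0' = 0
  · have hnotin : '0' ∉ l := List.count_eq_zero.mp h0
    rw [hc0, h0]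
    simp only [gt_iff_lt, lt_self_iff_false, if_false]
    rw [cutterLoop_eq, hisin]
    have : l.contains '0' = false := by simpa using hnotin
    rw [this]
    simp only [Bool.not_false, Bool.true_and]
    have hcnt : ∀ d : Char, PySem.Str.count (PySem.Int.toStr n) (String.ofList [d]) = l.count d := by
      intro d
      rw [PySem.Str.count_eq, htl, String.toList_ofList]
      exact count_singleton l d
    have hlist : (["1", "2", "3", "4", "5", "6", "7", "8", "9"] : List String).all
        (fun d => !decide (PySem.Str.count (PySem.Int.toStr n) d > 1)) =
        (['1', '2', '3', '4', '5', '6', '7', '8', '9'] : List Char).all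
        (fun d => !decide (l.count d > 1)) := by
      simp only [List.all_cons, List.all_nil]
      rw [show ("1" : String) = String.ofList ['1'] from rfl, hcnt '1',
          show ("2" : String) = String.ofList ['2'] from rfl, hcnt '2',
          show ("3" : String) = String.ofList ['3'] from rfl, hcnt '3',
          show ("4" : String) = String.ofList ['4'] from rfl, hcnt '4',
          show ("5" : String) = String.ofList ['5'] from rfl, hcnt '5',
          show ("6" : String) = String.ofList ['6'] from rfl, hcnt '6',
          show ("7" : String) = String.ofList ['7'] from rfl, hcnt '7',
          show ("8" : String) = String.ofList ['8'] from rfl, hcnt '8',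
          show ("9" : String) = String.ofList ['9'] from rfl, hcnt '9']
    rw [hlist, key_equiv l hshape hdash h0]
    rw [PySem.Set.len, PySem.Str.len, htl]
    by_cases hnd : l.Nodup
    · simp [hnd, length_ofList_eq_iff l |>.mpr hnd]
    · have : (PySem.Set.ofList l).length ≠ l.length := fun h => hnd ((length_ofList_eq_iff l).mp h)
      simp [hnd, this]
  · have hin : '0' ∈ l := by
      by_contra hno
      exact h0 (List.count_eq_zero.mpr hno)
    rw [hc0]
    have hpos : l.count '0' > 0 := List.count_pos_iff.mpr hin
    simp only [gt_iff_lt, hpos, if_true]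
    rw [hisin]
    have : l.contains '0' = true := by simpa using hin
    rw [this]
    simp
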